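-- pv_equiv track=rewrite | github.com/archishmanghos/DSA-Contests | Interviews/GFG/random-problems/Medium/Filling-Bucket/Filling-Bucket.py | fillingBucket
-- ===== SOURCE A (Python) =====
-- def fillingBucket(N):
--     cur, pre, prepre, mod = 0, 0, 0, int(1e8)
--     for i in range(N + 1):
--         if i == 0: cur = 1
--         else:
--             cur = (cur + pre) % mod
--             if i > 1:
--                 cur = (cur + prepre) % mod
--         prepre = pre
--         pre = cur
--         cur = 0
--
--     return pre
-- ===== SOURCE B (Python) =====
-- def fillingBucket(N):
--     MOD = int(1e8)
--     if N < 0: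
--         return 0
--
--     def fib_pair(n):
--         # returns (F(n) % MOD, F(n+1) % MOD), fast doubling
--         if n == 0:
--             return (0, 1)
--         a, b = fib_pair(n // 2)
--         c = (a * (2 * b - a)) % MOD
--         d = (a * a + b * b) % MOD
--         if n % 2 == 1:
--             return (d, (c + d) % MOD)
--         return (c, d)
--
--     return fib_pair(N + 1)[0]
-- ===== Notes on version B (the rewrite author's own statement) =====
-- stated objective: faster
-- what changed: Replaces the O(N) iterative Fibonacci loop with O(log N) fast-doubling recursion mod 1e8.
import Mathlib
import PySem

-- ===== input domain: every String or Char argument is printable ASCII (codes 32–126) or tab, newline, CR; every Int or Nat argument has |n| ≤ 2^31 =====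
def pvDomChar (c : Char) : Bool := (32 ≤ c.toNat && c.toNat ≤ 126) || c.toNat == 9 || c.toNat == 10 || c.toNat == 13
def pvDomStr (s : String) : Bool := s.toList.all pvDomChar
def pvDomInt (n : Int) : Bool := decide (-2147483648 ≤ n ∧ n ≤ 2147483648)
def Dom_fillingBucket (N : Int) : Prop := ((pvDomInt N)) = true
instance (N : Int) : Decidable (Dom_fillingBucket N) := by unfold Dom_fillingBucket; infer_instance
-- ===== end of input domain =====

-- B replaces A's O(N) iterative loop by fast-doubling recursion (O(log N)); return values agree everywhere.

-- ===== PORT A =====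
-- one loop iteration of A: state (cur, pre, prepre); cur is reset to 0 at the end of each iteration
def fbStepA (st : Int × Int × Int) (i : Int) : Int × Int × Int :=
  let cur := st.1
  let pre := st.2.1
  let prepre := st.2.2
  let cur :=
    if i = 0 then (1 : Int)
    else
      let cur := PySem.Int.mod (cur + pre) 100000000
      if i > 1 then PySem.Int.mod (cur + prepre) 100000000 else cur
  (0, cur, pre)

def fillingBucket (N : Int) : Int :=
  ((PySem.List.pyRange 0 (N + 1) 1).foldl fbStepA (0, 0, 0)).2.1

-- ===== PORT B =====
-- fast doubling: returns (F(n) % MOD, F(n+1) % MOD)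
def fbFibPair : Nat → Int × Int
  | 0 => (0, 1)
  | (n + 1) =>
    let p := fbFibPair ((n + 1) / 2)
    let a := p.1
    let b := p.2
    let c := PySem.Int.mod (a * (2 * b - a)) 100000000
    let d := PySem.Int.mod (a * a + b * b) 100000000
    if (n + 1) % 2 = 1 then (d, PySem.Int.mod (c + d) 100000000) else (c, d)
decreasing_by omega

def fillingBucket_alt (N : Int) : Int :=
  if N < 0 then 0 else (fbFibPair (N + 1).toNat).1

-- ===== PRECONDITION & SPEC =====
def Spec_fillingBucket (N : Int) (out : Int) : Prop := out = fillingBucket_alt N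
instance (N : Int) (out : Int) : Decidable (Spec_fillingBucket N out) := by unfold Spec_fillingBucket; infer_instance

-- ===== CLAIM (what is proved, stated in full; the proofs are below) =====
def Claim_equal_fillingBucket : Prop := ∀ (N : Int), Dom_fillingBucket N → Spec_fillingBucket N (fillingBucket N)

-- ===== LEMMAS AND PROOFS =====

theorem fbFibPair_eq (n : Nat) :
    fbFibPair n = ((Nat.fib n : Int) % 100000000, (Nat.fib (n + 1) : Int) % 100000000) := by
  induction n using Nat.strong_induction_on with
  | _ n ih =>
    match n with
    | 0 => simp [fbFibPair]
    | (m + 1) =>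
      have hlt : (m + 1) / 2 < m + 1 := by omega
      rw [fbFibPair]
      rw [ih _ hlt]
      set k := (m + 1) / 2 with hk
      have hmodpos : ∀ x : Int, PySem.Int.mod x 100000000 = x % 100000000 := fun x =>
        PySem.Int.mod_eq_emod_of_pos (by norm_num)
      have hmE : ∀ x : Int, x % (100000000 : Int) ≡ x [ZMOD (100000000 : Int)] := fun x =>
        Int.emod_emod_of_dvd x dvd_rfl
      simp only [hmodpos]
      have hc : ((Nat.fib k : Int) % 100000000 * (2 * ((Nat.fib (k+1) : Int) % 100000000) - (Nat.fib k : Int) % 100000000)) % 100000000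
          = (Nat.fib (2 * k) : Int) % 100000000 := by
        have h2 : (Nat.fib (2 * k) : Int) = (Nat.fib k : Int) * (2 * (Nat.fib (k+1) : Int) - (Nat.fib k : Int)) := by
          have := Nat.fib_two_mul k
          have hle : Nat.fib k ≤ 2 * Nat.fib (k + 1) :=
            le_trans (Nat.fib_le_fib_succ) (by omega)
          push_cast [this, Nat.cast_sub hle]
          ring
        rw [h2]
        exact (hmE _).mul (((hmE _).mul_left 2).sub (hmE _))
      have hd : ((Nat.fib k : Int) % 100000000 * ((Nat.fib k : Int) % 100000000) + (Nat.fib (k+1) : Int) % 100000000 * ((Nat.fib (k+1) : Int) % 100000000)) % 100000000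
          = (Nat.fib (2 * k + 1) : Int) % 100000000 := by
        have h2 : (Nat.fib (2 * k + 1) : Int) = (Nat.fib k : Int) * (Nat.fib k : Int) + (Nat.fib (k+1) : Int) * (Nat.fib (k+1) : Int) := by
          have := Nat.fib_two_mul_add_one k
          push_cast [this]
          ring
        rw [h2]
        exact ((hmE _).mul (hmE _)).add ((hmE _).mul (hmE _))
      by_cases hpar : (m + 1) % 2 = 1
      · have hm : m + 1 = 2 * k + 1 := by omega
        simp only [hpar, if_true]
        rw [hm]
        refine Prod.ext ?_ ?_
        · simpa using hd
        · show (_ : Int) % 100000000 = (Nat.fib (2 * k + 1 + 1) : Int) % 100000000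
          have hfib : (Nat.fib (2 * k + 1 + 1) : Int) = (Nat.fib (2 * k) : Int) + (Nat.fib (2 * k + 1) : Int) := by
            have := Nat.fib_add_two (n := 2 * k)
            push_cast [this]; ring
          rw [hfib]
          calc ((Nat.fib k : Int) % 100000000 * (2 * ((Nat.fib (k+1) : Int) % 100000000) - (Nat.fib k : Int) % 100000000) % 100000000
                + ((Nat.fib k : Int) % 100000000 * ((Nat.fib k : Int) % 100000000) + (Nat.fib (k+1) : Int) % 100000000 * ((Nat.fib (k+1) : Int) % 100000000)) % 100000000) % 100000000
              = ((Nat.fib (2 * k) : Int) % 100000000 + (Nat.fib (2 * k + 1) : Int) % 100000000) % 100000000 := by rw [hc, hd]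
            _ = ((Nat.fib (2 * k) : Int) + (Nat.fib (2 * k + 1) : Int)) % 100000000 := (hmE _).add (hmE _)
      · have hm : m + 1 = 2 * k := by omega
        simp only [hpar, if_false]
        rw [hm]
        exact Prod.ext (by simpa using hc) (by simpa using hd)

-- A's loop invariant: after processing i = 0 .. m, pre = fib (m+1) % MOD, prepre = fib m % MOD
theorem loopA_eq (m : Nat) :
    (PySem.List.pyRange 0 ((m : Int) + 1) 1).foldl fbStepA (0, 0, 0)
      = (0, (Nat.fib (m + 1) : Int) % 100000000, (Nat.fib m : Int) % 100000000) := by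
  induction m with
  | zero =>
    rw [show ((0 : Nat) : Int) + 1 = 0 + 1 by norm_num, PySem.List.pyRange_one_singleton]
    simp [fbStepA]
  | succ m ih =>
    have hsplit : PySem.List.pyRange 0 ((↑(m + 1) : Int) + 1) 1
        = PySem.List.pyRange 0 ((m : Int) + 1) 1 ++ [(m : Int) + 1] := by
      have := PySem.List.pyRange_one_succ_right (a := 0) (b := (m : Int) + 1) (by positivity)
      simpa [add_assoc] using this
    rw [hsplit, List.foldl_append, ih]
    simp only [List.foldl]
    have hmodpos : ∀ x : Int, PySem.Int.mod x 100000000 = x % 100000000 := fun x =>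
      PySem.Int.mod_eq_emod_of_pos (by norm_num)
    have hmE : ∀ x : Int, x % (100000000 : Int) ≡ x [ZMOD (100000000 : Int)] := fun x =>
      Int.emod_emod_of_dvd x dvd_rfl
    match m with
    | 0 => simp [fbStepA]
    | (m' + 1) =>
      have hne : ((m' + 1 : Nat) : Int) + 1 ≠ 0 := by push_cast; omega
      have hgt : ((m' + 1 : Nat) : Int) + 1 > 1 := by push_cast; omega
      simp only [fbStepA, hmodpos, if_neg hne, if_pos hgt]
      refine Prod.ext rfl (Prod.ext ?_ rfl)
      show ((0 + (Nat.fib (m' + 1 + 1) : Int) % 100000000) % 100000000 + (Nat.fib (m' + 1) : Int) % 100000000) % 100000000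
          = (Nat.fib (m' + 1 + 1 + 1) : Int) % 100000000
      have hfib : (Nat.fib (m' + 1 + 1 + 1) : Int) = (Nat.fib (m' + 1 + 1) : Int) + (Nat.fib (m' + 1) : Int) := by
        have := Nat.fib_add_two (n := m' + 1)
        push_cast [this]; ring
      rw [hfib, zero_add]
      exact (((hmE _).trans (hmE _)).add (hmE _))

-- ===== VERDICT (by name: the statement is the Claim_ definition above) =====
theorem fillingBucket_spec : Claim_equal_fillingBucket := by
  intro N _
  unfold Spec_fillingBucket fillingBucket fillingBucket_alt
  by_cases hneg : N < 0
  · rw [if_pos hneg, PySem.List.pyRange_one_eq_nil (by omega)]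
    simp
  · rw [if_neg hneg]
    have hN : N = ((N.toNat : Nat) : Int) := by omega
    have htn : (N + 1).toNat = N.toNat + 1 := by omega
    rw [htn, fbFibPair_eq, hN, loopA_eq, Int.toNat_natCast]
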